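-- pv_equiv track=rewrite | github.com/manarmohammed554-blip/Assignment2 | MaialiManarA2Q3.py | getPriceIncreaseStats
-- ===== SOURCE A (Python) =====
-- def getPriceIncreaseStats(Data: list) -> tuple:
--     """
--     Purpose:
--         Calculate the increasing change in the data, with the maximum difference.
--
--     Paramters:
--         Data: a list of tuples containing bitcoin info.
--
--     Returns:
--         A tuple containing:
--         maxDiff: integer representing the max difference in price in subsequent days.
--         maxIndex: the index representing the index of the maximum price in the list.
--         numOfDays: integer representing the number of days with an increase in price.
--     """
--     numOfDays = 0
--     maxIndex = 0
--     maxDiff = -1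
--
--     for index in range(1, len(Data)):
--         tempVal = Data[index][1] - Data[index - 1][1]
--         if tempVal > 0:
--             numOfDays += 1
--             if tempVal > maxDiff:
--                 maxDiff = tempVal
--                 maxIndex = index
--     outputTuple = (maxDiff, maxIndex, numOfDays)
--     return outputTuple
-- ===== SOURCE B (Python) =====
-- def getPriceIncreaseStats(Data: list) -> tuple:
--     # Different decomposition: build the diffs list once, count up-days in one
--     # pass, then use max()/index() to find the largest diff and its first
--     # position; (-1, 0, 0) when no day increased.
--     diffs = [Data[i + 1][1] - Data[i][1] for i in range(len(Data) - 1)]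
--     numOfDays = sum(1 for d in diffs if d > 0)
--     if numOfDays == 0:
--         return (-1, 0, 0)
--     m = max(diffs)
--     return (m, diffs.index(m) + 1, numOfDays)
-- ===== Notes on version B (the rewrite author's own statement) =====
-- stated objective: alternative
-- what changed: A's single stateful index loop is replaced by a diffs-list decomposition: build the list of day-to-day differences once, count the positive ones in one pass, and obtain the maximum positive difference and its first 1-based position with max()/index(), returning (-1, 0, 0) when no day increased.
import Mathlib
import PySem

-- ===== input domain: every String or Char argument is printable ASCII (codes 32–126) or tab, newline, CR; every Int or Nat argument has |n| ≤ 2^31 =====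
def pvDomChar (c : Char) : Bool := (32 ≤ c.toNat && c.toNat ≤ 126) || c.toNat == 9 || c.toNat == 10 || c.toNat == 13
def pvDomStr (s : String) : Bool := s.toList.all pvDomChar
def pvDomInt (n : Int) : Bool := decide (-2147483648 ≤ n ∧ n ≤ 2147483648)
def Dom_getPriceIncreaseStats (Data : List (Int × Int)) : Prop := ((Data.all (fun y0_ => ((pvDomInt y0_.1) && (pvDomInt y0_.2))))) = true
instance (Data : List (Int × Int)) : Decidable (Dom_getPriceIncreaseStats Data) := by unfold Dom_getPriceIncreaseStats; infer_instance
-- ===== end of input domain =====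

-- B replaces A's single index loop by a diffs-list decomposition (count pass + max()/index()); objective: alternative structure, same O(n) cost.

-- ===== PORT A =====
-- single loop over indices 1..len-1, state (numOfDays, maxIndex, maxDiff)
def getPriceIncreaseStats (Data : List (Int × Int)) : Int × Int × Int :=
  let st := (PySem.List.pyRange 1 (Data.length) 1).foldl
    (fun (st : Int × Int × Int) (index : Int) =>
      let (numOfDays, maxIndex, maxDiff) := st
      let tempVal := (PySem.List.pyGetD Data index (0, 0)).2
                   - (PySem.List.pyGetD Data (index - 1) (0, 0)).2
      if tempVal > 0 then
        if tempVal > maxDiff then (numOfDays + 1, index, tempVal)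
        else (numOfDays + 1, maxIndex, maxDiff)
      else (numOfDays, maxIndex, maxDiff))
    (0, 0, -1)
  (st.2.2, st.2.1, st.1)

-- ===== PORT B =====
-- diffs list, then a count pass, then max()/index() (the .getD defaults only
-- totalise max()/index(): both branches are unreachable when numOfDays ≠ 0)
def getPriceIncreaseStats_alt (Data : List (Int × Int)) : Int × Int × Int :=
  let diffs := (PySem.List.pyRange 0 ((Data.length : Int) - 1) 1).map
    (fun i => (PySem.List.pyGetD Data (i + 1) (0, 0)).2
            - (PySem.List.pyGetD Data i (0, 0)).2)
  let numOfDays : Int := (diffs.map (fun d => if d > 0 then (1 : Int) else 0)).sum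
  if numOfDays = 0 then (-1, 0, 0)
  else
    let m := (PySem.List.max? diffs (fun d => d)).getD 0
    let i : Nat := (PySem.List.index? diffs m).getD 0
    (m, (i : Int) + 1, numOfDays)

-- ===== PRECONDITION & SPEC =====
def Spec_getPriceIncreaseStats (Data : List (Int × Int)) (out : Int × Int × Int) : Prop := out = getPriceIncreaseStats_alt Data
instance (Data : List (Int × Int)) (out : Int × Int × Int) : Decidable (Spec_getPriceIncreaseStats Data out) := by unfold Spec_getPriceIncreaseStats; infer_instance

-- ===== CLAIM (what is proved, stated in full; the proofs are below) =====
def Claim_equal_getPriceIncreaseStats : Prop := ∀ (Data : List (Int × Int)), Dom_getPriceIncreaseStats Data → Spec_getPriceIncreaseStats Data (getPriceIncreaseStats Data)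

-- ===== LEMMAS AND PROOFS =====

/-- The list of consecutive second-component differences. -/
def pvDiffs : List (Int × Int) → List Int
  | a :: b :: t => (b.2 - a.2) :: pvDiffs (b :: t)
  | _ => []

/-- A's loop, rewritten as structural recursion over the diffs list;
`p` is the 1-based Data index of the diff at the head. -/
def pvRunA : List Int → Int → Int × Int × Int → Int × Int × Int
  | [], _, st => st
  | d :: t, p, (c, mi, md) =>
    if d > 0 then
      if d > md then pvRunA t (p + 1) (c + 1, p, d)
      else pvRunA t (p + 1) (c + 1, mi, md)
    else pvRunA t (p + 1) (c, mi, md)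

theorem pvDiffs_length : ∀ (Data : List (Int × Int)), (pvDiffs Data).length = Data.length - 1 := by
  intro Data
  match Data with
  | [] => simp [pvDiffs]
  | [a] => simp [pvDiffs]
  | a :: b :: t =>
    have := pvDiffs_length (b :: t)
    simp [pvDiffs] at this ⊢
    omega

theorem pvDiffs_getElem : ∀ (Data : List (Int × Int)) (k : Nat) (h : k + 1 < Data.length),
    (pvDiffs Data)[k]'(by rw [pvDiffs_length]; omega) = Data[k + 1].2 - Data[k].2 := by
  intro Data k h
  match Data, k with
  | a :: b :: t, 0 => simp [pvDiffs]
  | a :: b :: t, k + 1 =>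
    have := pvDiffs_getElem (b :: t) k (by simpa using h)
    simpa [pvDiffs] using this

theorem pvDiffs_drop : ∀ (Data : List (Int × Int)) (k : Nat) (h : k + 1 < Data.length),
    pvDiffs (Data.drop k) = (Data[k + 1].2 - Data[k].2) :: pvDiffs (Data.drop (k + 1)) := by
  intro Data k h
  match Data, k with
  | a :: b :: t, 0 => simp [pvDiffs]
  | a :: b :: t, k + 1 =>
    have := pvDiffs_drop (b :: t) k (by simpa using h)
    simpa using this

/-- A's indexed fold from position `k+1` equals `pvRunA` over the remaining diffs. -/
theorem pvA_fold_gen (Data : List (Int × Int)) :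
    ∀ (m k : Nat) (st : Int × Int × Int), Data.length - 1 - k ≤ m →
    (PySem.List.pyRange ((k : Int) + 1) (Data.length) 1).foldl
      (fun (st : Int × Int × Int) (index : Int) =>
        let (numOfDays, maxIndex, maxDiff) := st
        let tempVal := (PySem.List.pyGetD Data index (0, 0)).2
                     - (PySem.List.pyGetD Data (index - 1) (0, 0)).2
        if tempVal > 0 then
          if tempVal > maxDiff then (numOfDays + 1, index, tempVal)
          else (numOfDays + 1, maxIndex, maxDiff)
        else (numOfDays, maxIndex, maxDiff)) st
    = pvRunA (pvDiffs (Data.drop k)) ((k : Int) + 1) st := by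
  intro m
  induction m with
  | zero =>
    intro k st hm
    have hk : Data.length ≤ k + 1 := by omega
    have h1 : PySem.List.pyRange ((k : Int) + 1) (Data.length) 1 = [] :=
      PySem.List.pyRange_one_eq_nil (by exact_mod_cast hk)
    have h2 : pvDiffs (Data.drop k) = [] := by
      have := pvDiffs_length (Data.drop k)
      have hlen : (Data.drop k).length ≤ 1 := by simp; omega
      rcases List.length_eq_zero_iff.mp (by rw [this]; omega) with h
      exact h
    rw [h1, h2]; rfl
  | succ m ih =>
    intro k st hm
    by_cases hk : k + 1 < Data.length
    · have hr : PySem.List.pyRange ((k : Int) + 1) (Data.length) 1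
          = ((k : Int) + 1) :: PySem.List.pyRange ((k : Int) + 1 + 1) (Data.length) 1 :=
        PySem.List.pyRange_one_cons (by exact_mod_cast hk)
      rw [hr, pvDiffs_drop Data k hk]
      simp only [List.foldl_cons]
      obtain ⟨c, mi, md⟩ := st
      have hget1 : PySem.List.pyGetD Data ((k : Int) + 1) (0, 0) = Data[k + 1] := by
        rw [show ((k : Int) + 1) = ((k + 1 : Nat) : Int) by omega]
        rw [PySem.List.pyGetD_natCast]
        exact List.getD_eq_getElem _ _ hk
      have hget0 : PySem.List.pyGetD Data ((k : Int) + 1 - 1) (0, 0) = Data[k] := by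
        rw [show ((k : Int) + 1 - 1) = ((k : Nat) : Int) by ring]
        rw [PySem.List.pyGetD_natCast]
        exact List.getD_eq_getElem _ _ (by omega)
      have hrec : ((k : Int) + 1 + 1) = (((k + 1 : Nat) : Int) + 1) := by push_cast; ring
      rw [hget1, hget0]
      simp only [pvRunA]
      split_ifs with h1 h2
      · rw [hrec, ih (k + 1) _ (by omega), ]
      · rw [hrec, ih (k + 1) _ (by omega)]
      · rw [hrec, ih (k + 1) _ (by omega)]
    · have h1 : PySem.List.pyRange ((k : Int) + 1) (Data.length) 1 = [] :=
        PySem.List.pyRange_one_eq_nil (by exact_mod_cast (by omega : Data.length ≤ k + 1))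
      have h2 : pvDiffs (Data.drop k) = [] := by
        have := pvDiffs_length (Data.drop k)
        exact List.length_eq_zero_iff.mp (by rw [this]; simp; omega)
      rw [h1, h2]; rfl

/-- Characterisation of `pvRunA`: count of positive diffs, plus first index of
the maximum when it beats the running best. -/
theorem pvRunA_char : ∀ (ds : List Int) (p c mi md : Int),
    pvRunA ds p (c, mi, md)
    = (c + (ds.countP (fun d => decide (0 < d)) : Int),
       match PySem.List.max? ds (fun x => x) with
       | none => (mi, md)
       | some M => if 0 < M ∧ md < M
           then (p + (((PySem.List.index? ds M).getD 0 : Nat) : Int), M)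
           else (mi, md)) := by
  intro ds
  induction ds with
  | nil => intro p c mi md; simp [pvRunA, PySem.List.max?]
  | cons d t ih =>
    intro p c mi md
    have hmax : PySem.List.max? (d :: t) (fun x => x) = some (t.foldl max d) :=
      PySem.List.max?_id_cons d t
    simp only [pvRunA]
    rcases t with _ | ⟨x, t'⟩
    · -- t = []
      by_cases h1 : d > 0
      · by_cases h2 : d > md
        · rw [if_pos h1, if_pos h2]
          have hc : 0 < d ∧ md < d := ⟨h1, h2⟩
          simp [pvRunA, hmax, h1]
          omega
        · rw [if_pos h1, if_neg h2]
          have hc : ¬(0 < d ∧ md < d) := by omega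
          simp [pvRunA, hmax, h1]
          omega
      · rw [if_neg h1]
        have hc : ¬(0 < d ∧ md < d) := by omega
        simp [pvRunA, hmax, h1]
    · -- t = x :: t'
      have hmt : PySem.List.max? (x :: t') (fun x => x) = some (t'.foldl max x) :=
        PySem.List.max?_id_cons x t'
      have hM : (x :: t').foldl max d = max d (t'.foldl max x) := by
        simp only [List.foldl_cons]
        exact List.foldl_assoc
      set Mt := t'.foldl max x with hMt'
      have hdM : d ≤ (x :: t').foldl max d := by rw [hM]; exact le_max_left _ _
      have hMtM : Mt ≤ (x :: t').foldl max d := by rw [hM]; exact le_max_right _ _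
      split_ifs with h1 h2
      · -- d > 0, d > md : state becomes (c+1, p, d)
        rw [ih (p + 1) (c + 1) p d]; simp only [hmax, hmt]
        by_cases hlt : d < Mt
        · have hMeq : (x :: t').foldl max d = Mt := by rw [hM]; omega
          have hcond : 0 < Mt ∧ d < Mt := ⟨by omega, hlt⟩
          rw [if_pos hcond, hMeq, if_pos ⟨by omega, by omega⟩]
          have hne : d ≠ Mt := by omega
          have hidx : PySem.List.index? (d :: x :: t') Mt
              = (PySem.List.index? (x :: t') Mt).map (· + 1) :=
            PySem.List.index?_cons_of_ne (x :: t') hne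
          have hmem : Mt ∈ (x :: t') := by
            have := PySem.List.max?_mem hmt; simpa using this
          have hsome : (PySem.List.index? (x :: t') Mt).isSome :=
            (PySem.List.index?_isSome_iff (x :: t') Mt).mpr hmem
          obtain ⟨j, hj⟩ := Option.isSome_iff_exists.mp hsome
          rw [hidx, hj]
          simp [List.countP_cons, h1]
          constructor
          · omega
          · ring
        · have hMeq : (x :: t').foldl max d = d := by rw [hM]; omega
          have hcond : ¬(0 < Mt ∧ d < Mt) := by intro hc; omega
          rw [if_neg hcond, hMeq, if_pos ⟨h1, h2⟩]
          rw [PySem.List.index?_cons_self]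
          simp [List.countP_cons, h1]
          omega
      · -- d > 0, d ≤ md : state unchanged (c+1, mi, md); note d ≤ md
        rw [ih (p + 1) (c + 1) mi md]; simp only [hmax, hmt]
        by_cases hc2 : 0 < Mt ∧ md < Mt
        · have hMeq : (x :: t').foldl max d = Mt := by rw [hM]; omega
          rw [if_pos hc2, hMeq, if_pos ⟨hc2.1, hc2.2⟩]
          have hne : d ≠ Mt := by omega
          have hidx : PySem.List.index? (d :: x :: t') Mt
              = (PySem.List.index? (x :: t') Mt).map (· + 1) :=
            PySem.List.index?_cons_of_ne (x :: t') hne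
          have hmem : Mt ∈ (x :: t') := by
            have := PySem.List.max?_mem hmt; simpa using this
          have hsome : (PySem.List.index? (x :: t') Mt).isSome :=
            (PySem.List.index?_isSome_iff (x :: t') Mt).mpr hmem
          obtain ⟨j, hj⟩ := Option.isSome_iff_exists.mp hsome
          rw [hidx, hj]
          simp [List.countP_cons, h1]
          constructor
          · omega
          · ring
        · have hcond : ¬(0 < (x :: t').foldl max d ∧ md < (x :: t').foldl max d) := by
            rw [hM]; rintro ⟨hp, hmd⟩
            push Not at hc2
            rcases max_cases d Mt with ⟨he, _⟩ | ⟨he, _⟩ <;> rw [he] at hp hmd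
            · omega
            · exact absurd (hc2 hp) (by omega)
          rw [if_neg hc2, if_neg hcond]
          simp [List.countP_cons, h1]
          omega
      · -- d ≤ 0 : state unchanged
        rw [ih (p + 1) c mi md]; simp only [hmax, hmt]
        by_cases hc2 : 0 < Mt ∧ md < Mt
        · have hMeq : (x :: t').foldl max d = Mt := by rw [hM]; omega
          rw [if_pos hc2, hMeq, if_pos ⟨hc2.1, hc2.2⟩]
          have hne : d ≠ Mt := by omega
          have hidx : PySem.List.index? (d :: x :: t') Mt
              = (PySem.List.index? (x :: t') Mt).map (· + 1) :=
            PySem.List.index?_cons_of_ne (x :: t') hne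
          have hmem : Mt ∈ (x :: t') := by
            have := PySem.List.max?_mem hmt; simpa using this
          have hsome : (PySem.List.index? (x :: t') Mt).isSome :=
            (PySem.List.index?_isSome_iff (x :: t') Mt).mpr hmem
          obtain ⟨j, hj⟩ := Option.isSome_iff_exists.mp hsome
          rw [hidx, hj]
          simp [List.countP_cons, h1]
          ring
        · have hcond : ¬(0 < (x :: t').foldl max d ∧ md < (x :: t').foldl max d) := by
            rw [hM]; rintro ⟨hp, hmd⟩
            push Not at hc2
            rcases max_cases d Mt with ⟨he, _⟩ | ⟨he, _⟩ <;> rw [he] at hp hmd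
            · omega
            · exact absurd (hc2 hp) (by omega)
          rw [if_neg hc2, if_neg hcond]
          simp [List.countP_cons, h1]

/-- B's diffs list equals `pvDiffs`. -/
theorem pvDiffsB_eq (Data : List (Int × Int)) :
    (PySem.List.pyRange 0 ((Data.length : Int) - 1) 1).map
      (fun i => (PySem.List.pyGetD Data (i + 1) (0, 0)).2
              - (PySem.List.pyGetD Data i (0, 0)).2)
    = pvDiffs Data := by
  apply List.ext_getElem
  · simp [PySem.List.length_pyRange_one, pvDiffs_length]
  · intro k h1 h2
    have hk : k + 1 < Data.length := by
      have := pvDiffs_length Data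
      omega
    simp only [List.getElem_map]
    rw [PySem.List.getElem_pyRange_one]
    rw [zero_add]
    have e1 : PySem.List.pyGetD Data ((k : Int) + 1) (0, 0) = Data[k + 1] := by
      rw [show ((k : Int) + 1) = ((k + 1 : Nat) : Int) by omega]
      rw [PySem.List.pyGetD_natCast]
      exact List.getD_eq_getElem _ _ hk
    have e0 : PySem.List.pyGetD Data ((k : Int)) (0, 0) = Data[k] := by
      rw [PySem.List.pyGetD_natCast]
      exact List.getD_eq_getElem _ _ (by omega)
    rw [e1, e0, pvDiffs_getElem Data k hk]

/-- B's 0/1-sum is the positive-diff count. -/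
theorem pvSum_eq_countP (ds : List Int) :
    (ds.map (fun d => if d > 0 then (1 : Int) else 0)).sum
    = (ds.countP (fun d => decide (0 < d)) : Int) := by
  rw [show (fun (d : Int) => if d > 0 then (1 : Int) else 0)
      = (fun d => if (fun d => decide ((0 : Int) < d)) d = true then (1 : Int) else 0) by
    funext d; simp [GT.gt]]
  exact PySem.List.sum_map_ite_one_zero _ _

-- ===== VERDICT (by name: the statement is the Claim_ definition above) =====
theorem getPriceIncreaseStats_spec : Claim_equal_getPriceIncreaseStats := by
  intro Data _
  unfold Spec_getPriceIncreaseStats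
  simp only [getPriceIncreaseStats, getPriceIncreaseStats_alt]
  have hA := pvA_fold_gen Data Data.length 0 (0, 0, -1) (by omega)
  simp only [Nat.cast_zero, zero_add, List.drop_zero] at hA
  rw [hA, pvRunA_char, pvDiffsB_eq, pvSum_eq_countP]
  set ds := pvDiffs Data with hds
  by_cases hcnt : ds.countP (fun d => decide (0 < d)) = 0
  · -- no up-day: both return (-1, 0, 0)
    rw [hcnt, if_pos (show ((0 : Nat) : Int) = 0 by simp)]
    rcases hm : PySem.List.max? ds (fun x => x) with _ | M
    · simp
    · have hM0 : ¬ (0 < M) := by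
        have hmem := PySem.List.max?_mem hm
        have := List.countP_eq_zero.mp hcnt M hmem
        simpa using this
      simp [hM0]
  · -- at least one up-day
    obtain ⟨d, hdmem, hdpos⟩ := List.countP_pos_iff.mp (Nat.pos_of_ne_zero hcnt)
    have hne : ds ≠ [] := by intro h; rw [h] at hdmem; exact absurd hdmem (List.not_mem_nil)
    rcases hm : PySem.List.max? ds (fun x => x) with _ | M
    · rw [(PySem.List.max?_eq_none_iff (xs := ds) (key := fun x => x)).mp hm] at hdmem
      exact absurd hdmem (List.not_mem_nil)
    · have hdpos' : 0 < d := by simpa using hdpos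
      have hMpos : 0 < M := lt_of_lt_of_le hdpos' (PySem.List.max?_isMax hm d hdmem)
      simp only [Option.getD_some]
      rw [if_pos ⟨hMpos, by omega⟩]
      rw [if_neg (by exact_mod_cast hcnt : ¬((ds.countP (fun d => decide (0 < d)) : Int) = 0))]
      simp only [Prod.mk.injEq]
      exact ⟨by trivial, by omega, by omega⟩
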